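-- pv_equiv track=rewrite | github.com/mwdoyle-sfu/definite-clause-theorem-prover | a4.py | valid_clause
-- ===== SOURCE A (Python) =====
-- def is_atom(s):
--     if not isinstance(s, str):
--         return False
--     if s == "":
--         return False
--     return is_letter(s[0]) and all(is_letter(c) or c.isdigit() for c in s[1:])
--
-- def is_expression(e):
--     return e == '<--' or e == '&'
--
-- def is_letter(s):
--     return len(s) == 1 and s.lower() in "_abcdefghijklmnopqrstuvwxyz"
--
-- def even_elements(a):
--     return a[::2]
--
-- def odd_elements(a):
--     return a[1::2]
--
-- def valid_clause(lines):
--     # check for invalid cluases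
--     clauses = []
--     for line in lines:
--         clauses.append(line.split())
--     for clause in clauses:
--         atoms = even_elements(clause)
--         expressions = odd_elements(clause)
--         # check atoms
--         for atom in atoms:
--             if not is_atom(atom):
--                 return False
--         # check expressions
--         for expression in expressions:
--             if not is_expression(expression):
--                 return False
--     return True
-- ===== SOURCE B (Python) =====
-- def is_atom(s):
--     if not isinstance(s, str):
--         return False
--     if s == "":
--         return False
--     return is_letter(s[0]) and all(is_letter(c) or c.isdigit() for c in s[1:])
--
-- def is_expression(e):
--     return e == '<--' or e == '&'
--
-- def is_letter(s):
--     return len(s) == 1 and s.lower() in "_abcdefghijklmnopqrstuvwxyz"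
--
-- def _check(tokens):
--     # consume tokens two at a time: an atom, then (if present) a connective
--     if not tokens:
--         return True
--     if not is_atom(tokens[0]):
--         return False
--     if len(tokens) == 1:
--         return True
--     return is_expression(tokens[1]) and _check(tokens[2:])
--
-- def valid_clause(lines):
--     return all(_check(line.split()) for line in lines)
-- ===== Notes on version B (the rewrite author's own statement) =====
-- stated objective: alternative
-- what changed: Replaces A's even/odd slice copies and two separate per-clause validation loops with a recursive grammar check that consumes each clause's token list two tokens at a time (atom, then connective), short-circuiting on the first invalid token.
import Mathlib
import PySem

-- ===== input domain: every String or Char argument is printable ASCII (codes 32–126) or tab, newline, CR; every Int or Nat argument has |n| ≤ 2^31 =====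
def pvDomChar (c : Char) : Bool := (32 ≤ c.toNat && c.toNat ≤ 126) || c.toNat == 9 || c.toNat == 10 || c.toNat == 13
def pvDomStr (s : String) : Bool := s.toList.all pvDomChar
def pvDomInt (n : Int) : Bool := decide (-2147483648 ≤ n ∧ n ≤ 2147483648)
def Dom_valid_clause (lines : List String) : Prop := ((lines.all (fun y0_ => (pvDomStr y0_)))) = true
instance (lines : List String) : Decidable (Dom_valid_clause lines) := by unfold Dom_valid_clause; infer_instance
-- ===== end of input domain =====

-- B replaces A's even/odd slice copies and two separate per-clause loops with a
-- recursive grammar check consuming each clause two tokens at a time (objective: alternative).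

-- ===== PORT A =====
def is_letter (s : String) : Bool :=
  PySem.Str.len s == 1 && PySem.Str.isIn (PySem.Str.lower s) "_abcdefghijklmnopqrstuvwxyz"

def is_atom (s : String) : Bool :=
  -- 'isinstance(s, str)' is always true under the type convention
  if s == "" then false
  else
    -- s[0] / s[1:] taken by destructuring the character list (exact: s ≠ "" here)
    match s.toList with
    | [] => false  -- unreachable: s ≠ ""
    | c :: rest =>
      is_letter (String.ofList [c]) &&
        rest.all (fun ch => is_letter (String.ofList [ch]) || PySem.Str.strIsdigit (String.ofList [ch]))

def is_expression (e : String) : Bool := e == "<--" || e == "&"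

-- a[::2]; step 2 ≠ 0 so slice? is always 'some' and the default [] is never used
def even_elements (a : List String) : List String := (PySem.List.slice? a none none 2).getD []

-- a[1::2]
def odd_elements (a : List String) : List String := (PySem.List.slice? a (some 1) none 2).getD []

def valid_clause (lines : List String) : Bool :=
  let clauses := lines.map (fun line => PySem.Str.split₀ line)
  clauses.all (fun clause =>
    (even_elements clause).all (fun atom => is_atom atom) &&
    (odd_elements clause).all (fun expression => is_expression expression))

-- ===== PORT B =====
-- _check: consume tokens two at a time (atom, then connective), recursing on tokens[2:]
def check_tokens : List String → Bool
  | [] => true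
  | a :: rest =>
    if !is_atom a then false
    else
      match rest with
      | [] => true
      | e :: rest2 => is_expression e && check_tokens rest2

def valid_clause_alt (lines : List String) : Bool :=
  lines.all (fun line => check_tokens (PySem.Str.split₀ line))

-- ===== PRECONDITION & SPEC =====
def Spec_valid_clause (lines : List String) (out : Bool) : Prop := out = valid_clause_alt lines
instance (lines : List String) (out : Bool) : Decidable (Spec_valid_clause lines out) := by unfold Spec_valid_clause; infer_instance

-- ===== CLAIM (what is proved, stated in full; the proofs are below) =====
def Claim_equal_valid_clause : Prop := ∀ (lines : List String), Dom_valid_clause lines → Spec_valid_clause lines (valid_clause lines)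

-- ===== LEMMAS AND PROOFS =====

-- the elements at even positions of a list
def evens {α : Type} : List α → List α
  | [] => []
  | [x] => [x]
  | x :: _ :: r => x :: evens r

theorem evens_cons_tail {α : Type} (y : α) (r : List α) :
    evens (y :: r) = y :: evens r.tail := by
  cases r <;> simp [evens]

theorem fm_evens {α : Type} (xs : List α) :
    List.filterMap (fun k => xs[2 * k]?) (List.range ((xs.length + 1) / 2)) = evens xs := by
  induction xs using evens.induct with
  | case1 => simp [evens]
  | case2 x => simp [evens]
  | case3 x y r ih =>
    have hlen : ((x :: y :: r).length + 1) / 2 = (r.length + 1) / 2 + 1 := by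
      simp; omega
    rw [hlen, List.range_succ_eq_map, List.filterMap_cons, List.filterMap_map]
    have hf : ((fun k => (x :: y :: r)[2 * k]?) ∘ Nat.succ) = fun k => r[2 * k]? := by
      funext k
      have : 2 * Nat.succ k = 2 * k + 1 + 1 := by omega
      simp [this]
    rw [hf, ih]
    simp [evens]

theorem slice?_even {α : Type} (xs : List α) :
    PySem.List.slice? xs none none 2 = some (evens xs) := by
  rw [PySem.List.slice?, PySem.List.sliceIndices]
  simp only
  rw [if_neg (by omega : ¬ (2:Int) = 0)]
  have hcount : (if (0:Int) < 2 then if (0:Int) < (xs.length:Int) then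
      (((xs.length:Int) - 0 + 2 - 1) / 2).toNat else 0
      else if (xs.length:Int) < 0 then (((0:Int) - xs.length + -2 - 1) / -2).toNat else 0)
      = (xs.length + 1) / 2 := by
    split_ifs <;> omega
  have hfun : (fun k : Nat => xs[((0:Int) + 2 * (k:Int)).toNat]?) = fun k : Nat => xs[2 * k]? := by
    funext k
    have : ((0:Int) + 2 * (k:Int)).toNat = 2 * k := by omega
    rw [this]
  simp only [if_neg (by omega : ¬ (2:Int) < 0), hcount, hfun, fm_evens]

theorem slice?_odd {α : Type} (xs : List α) :
    PySem.List.slice? xs (some 1) none 2 = some (evens xs.tail) := by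
  cases xs with
  | nil => rfl
  | cons x r =>
    rw [PySem.List.slice?, PySem.List.sliceIndices]
    simp only
    rw [if_neg (by omega : ¬ (2:Int) = 0)]
    norm_num
    have hcount : (if 0 < r.length then (((r.length:Int) + 2 - 1) / 2).toNat else 0)
        = (r.length + 1) / 2 := by
      split_ifs <;> omega
    have hfun : (fun k : Nat => (x :: r)[((1:Int) + 2 * (k:Int)).toNat]?) =
        fun k : Nat => r[2 * k]? := by
      funext k
      have h1 : ((1:Int) + 2 * (k:Int)).toNat = 2 * k + 1 := by omega
      rw [h1]
      simp
    rw [hcount, hfun, fm_evens]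

theorem check_tokens_eq (ts : List String) :
    check_tokens ts = ((evens ts).all is_atom && (evens ts.tail).all is_expression) := by
  induction ts using evens.induct with
  | case1 => simp [check_tokens, evens]
  | case2 x =>
    rw [check_tokens]
    cases h : is_atom x <;> simp [h, evens]
  | case3 x y r ih =>
    rw [check_tokens]
    simp only [List.tail_cons, evens_cons_tail, List.all_cons, ih]
    cases is_atom x <;> cases is_expression y <;> simp [Bool.and_left_comm]

-- ===== VERDICT (by name: the statement is the Claim_ definition above) =====
theorem valid_clause_spec : Claim_equal_valid_clause := by
  intro lines _
  unfold Spec_valid_clause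
  simp only [valid_clause, valid_clause_alt, List.all_map]
  congr 1
  funext line
  rw [check_tokens_eq]
  simp only [even_elements, odd_elements, slice?_even, slice?_odd]
  simp
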